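-- pv_equiv track=rewrite | github.com/revenazb/pyindex | pyindex/interleave.py | interleave2
-- ===== SOURCE A (Python) =====
-- from math import ceil
--
-- def part1by1(n):
--     """
--     Inserts one 0 bit between each bit in `n`.
--
--     n: 16-bit integer
--     """
--     n &= 0x0000FFFF
--
--     n = (n | (n << 8)) & 0x00FF00FF
--     n = (n | (n << 4)) & 0x0F0F0F0F
--     n = (n | (n << 2)) & 0x33333333
--     n = (n | (n << 1)) & 0x55555555
--
--     return n
--
-- def interleave2(x, y):
--     """
--     Interleaves two integers.
--     """
--     max_bits = max(x.bit_length(), y.bit_length())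
--     iterations = int(ceil(max_bits / 16))
--
--     ret = 0
--     for i in range(iterations):
--         interleaved = part1by1(x & 0xFFFF) | \
--                       (part1by1(y & 0xFFFF) << 1)
--         ret |= (interleaved << (32 * i))
--
--         x = x >> 16
--         y = y >> 16
--     return ret
-- ===== SOURCE B (Python) =====
-- from math import ceil
--
-- def interleave2(x, y):
--     """
--     Interleaves two integers.
--     """
--     max_bits = max(x.bit_length(), y.bit_length())
--     iterations = int(ceil(max_bits / 16))
--     ret = 0
--     for j in range(16 * iterations):
--         ret |= ((x >> j) & 1) << (2 * j) | ((y >> j) & 1) << (2 * j + 1)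
--     return ret
-- ===== Notes on version B (the rewrite author's own statement) =====
-- stated objective: simpler
-- what changed: Replaces the part1by1 magic-mask bit-spreading helper and per-chunk OR-merging with a single direct per-bit Morton-interleave loop over the same 16*iterations bit range.
import Mathlib
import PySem

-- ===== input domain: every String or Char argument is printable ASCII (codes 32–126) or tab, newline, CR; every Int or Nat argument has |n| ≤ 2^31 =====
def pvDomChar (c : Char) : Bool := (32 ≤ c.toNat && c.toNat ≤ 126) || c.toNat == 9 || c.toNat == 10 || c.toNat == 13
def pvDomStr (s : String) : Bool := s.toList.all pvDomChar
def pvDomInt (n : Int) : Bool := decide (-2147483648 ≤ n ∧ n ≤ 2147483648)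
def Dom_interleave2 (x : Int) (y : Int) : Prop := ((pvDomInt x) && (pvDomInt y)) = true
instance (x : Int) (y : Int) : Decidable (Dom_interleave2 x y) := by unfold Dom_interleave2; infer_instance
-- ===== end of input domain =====

-- B replaces the part1by1 magic-mask bit-spreading helper with one direct per-bit
-- interleaving loop over the same 16*iterations bit range (objective: simpler).

-- ===== PORT A =====
def part1by1 (n : Int) : Int :=
  let n1 := PySem.Int.band n 0xFFFF
  let n2 := PySem.Int.band (PySem.Int.bor n1 (n1 <<< (8:Nat))) 0x00FF00FF
  let n3 := PySem.Int.band (PySem.Int.bor n2 (n2 <<< (4:Nat))) 0x0F0F0F0F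
  let n4 := PySem.Int.band (PySem.Int.bor n3 (n3 <<< (2:Nat))) 0x33333333
  let n5 := PySem.Int.band (PySem.Int.bor n4 (n4 <<< (1:Nat))) 0x55555555
  n5

def interleave2 (x : Int) (y : Int) : Int :=
  let maxBits := max (PySem.Int.bitLength x) (PySem.Int.bitLength y)
  -- int(ceil(max_bits / 16)) as exact integer ceiling division (the float division is exact here)
  let iterations := (maxBits + 15) / 16
  let s := (List.range iterations).foldl
    (fun (s : Int × Int × Int) (i : Nat) =>
      (PySem.Int.bor s.1
        ((PySem.Int.bor (part1by1 (PySem.Int.band s.2.1 0xFFFF))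
           ((part1by1 (PySem.Int.band s.2.2 0xFFFF)) <<< (1:Nat))) <<< (32 * i)),
       s.2.1 >>> (16:Nat), s.2.2 >>> (16:Nat)))
    (0, x, y)
  s.1

-- ===== PORT B =====
def interleave2_alt (x : Int) (y : Int) : Int :=
  let maxBits := max (PySem.Int.bitLength x) (PySem.Int.bitLength y)
  let iterations := (maxBits + 15) / 16
  (List.range (16 * iterations)).foldl
    (fun (ret : Int) (j : Nat) =>
      PySem.Int.bor ret
        (PySem.Int.bor ((PySem.Int.band (x >>> j) 1) <<< (2 * j))
          ((PySem.Int.band (y >>> j) 1) <<< (2 * j + 1))))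
    0

-- ===== PRECONDITION & SPEC =====
def Spec_interleave2 (x : Int) (y : Int) (out : Int) : Prop := out = interleave2_alt x y
instance (x : Int) (y : Int) (out : Int) : Decidable (Spec_interleave2 x y out) := by unfold Spec_interleave2; infer_instance

-- ===== CLAIM (what is proved, stated in full; the proofs are below) =====
def Claim_equal_interleave2 : Prop := ∀ (x : Int) (y : Int), Dom_interleave2 x y → Spec_interleave2 x y (interleave2 x y)

-- ===== LEMMAS AND PROOFS =====

-- ---- Nat-level bit toolbox ----

theorem pvNatDisj {t : Nat} (a b : Nat) (h : a < 2^t) : a &&& (b <<< t) = 0 := by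
  apply Nat.zero_of_testBit_eq_false
  intro i
  rw [Nat.testBit_and, Nat.testBit_shiftLeft]
  by_cases hi : t ≤ i
  · have : a.testBit i = false :=
      Nat.testBit_eq_false_of_lt (lt_of_lt_of_le h (Nat.pow_le_pow_right (by norm_num) hi))
    simp [this]
  · simp [hi]

theorem pvLorAdd : ∀ a b : Nat, a &&& b = 0 → a ||| b = a + b := by
  intro a
  induction a using Nat.strong_induction_on with
  | _ a ih =>
    intro b h
    match a, h with
    | 0, h => simp
    | (a+1), h =>
      have h2 : (a+1)/2 &&& b/2 = 0 := by rw [← Nat.and_div_two, h]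
      have hm : ¬((a+1) % 2 = 1 ∧ b % 2 = 1) := by
        intro ⟨u, v⟩
        have := (Nat.and_mod_two_eq_one).2 ⟨u, v⟩
        rw [h] at this; omega
      have ihh := ih ((a+1)/2) (by omega) (b/2) h2
      have e1 : ((a+1) ||| b) / 2 = (a+1)/2 ||| b/2 := Nat.or_div_two
      have e2 : ((a+1) ||| b) % 2 = (a+1) % 2 + b % 2 := by
        rcases Nat.mod_two_eq_zero_or_one (a+1) with u | u <;>
          rcases Nat.mod_two_eq_zero_or_one b with v | v
        · have : ¬(((a+1) ||| b) % 2 = 1) := by rw [Nat.or_mod_two_eq_one]; omega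
          omega
        · have : ((a+1) ||| b) % 2 = 1 := Nat.or_mod_two_eq_one.2 (Or.inr v); omega
        · have : ((a+1) ||| b) % 2 = 1 := Nat.or_mod_two_eq_one.2 (Or.inl u); omega
        · exact absurd ⟨u, v⟩ hm
      omega

theorem pvAddOr {t : Nat} (a b : Nat) (h : a < 2^t) : a + 2^t * b = a ||| (b <<< t) := by
  rw [pvLorAdd _ _ (pvNatDisj a b h), Nat.shiftLeft_eq]; ring

theorem pvShlOr (x y t : Nat) : (x ||| y) <<< t = (x <<< t) ||| (y <<< t) := by
  apply Nat.eq_of_testBit_eq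
  intro i
  simp only [Nat.testBit_shiftLeft, Nat.testBit_or]
  by_cases h : t ≤ i <;> simp [h]

theorem pvShlAnd (x y t : Nat) : (x &&& y) <<< t = (x <<< t) &&& (y <<< t) := by
  apply Nat.eq_of_testBit_eq
  intro i
  simp only [Nat.testBit_shiftLeft, Nat.testBit_and]
  by_cases h : t ≤ i <;> simp [h]

theorem pvOrSplit {t : Nat} (a b c d : Nat) (ha : a < 2^t) (hc : c < 2^t) :
    (a + 2^t * b) ||| (c + 2^t * d) = (a ||| c) + 2^t * (b ||| d) := by
  rw [pvAddOr a b ha, pvAddOr c d hc, pvAddOr _ _ (Nat.or_lt_two_pow ha hc), pvShlOr]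
  simp [Nat.or_assoc, Nat.or_left_comm]

theorem pvAndSplit {t : Nat} (a b c d : Nat) (ha : a < 2^t) (hc : c < 2^t) :
    (a + 2^t * b) &&& (c + 2^t * d) = (a &&& c) + 2^t * (b &&& d) := by
  rw [pvAddOr a b ha, pvAddOr c d hc,
      pvAddOr (a &&& c) (b &&& d) (lt_of_le_of_lt Nat.and_le_left ha), pvShlAnd]
  rw [Nat.and_or_distrib_left, Nat.and_or_distrib_right, Nat.and_or_distrib_right]
  rw [pvNatDisj a d ha, Nat.and_comm (b <<< t) c, pvNatDisj c b hc]
  simp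

-- literal-width specialisations
theorem pvOrSplit8 (a b c d : Nat) (ha : a < 256) (hc : c < 256) :
    (a + 256 * b) ||| (c + 256 * d) = (a ||| c) + 256 * (b ||| d) := by
  have h := pvOrSplit (t := 8) a b c d (by simpa using ha) (by simpa using hc)
  simpa using h

theorem pvAndSplit8 (a b c d : Nat) (ha : a < 256) (hc : c < 256) :
    (a + 256 * b) &&& (c + 256 * d) = (a &&& c) + 256 * (b &&& d) := by
  have h := pvAndSplit (t := 8) a b c d (by simpa using ha) (by simpa using hc)
  simpa using h

theorem pvOrSplit16 (a b c d : Nat) (ha : a < 65536) (hc : c < 65536) :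
    (a + 65536 * b) ||| (c + 65536 * d) = (a ||| c) + 65536 * (b ||| d) := by
  have h := pvOrSplit (t := 16) a b c d (by simpa using ha) (by simpa using hc)
  simpa using h

theorem pvAndSplit16 (a b c d : Nat) (ha : a < 65536) (hc : c < 65536) :
    (a + 65536 * b) &&& (c + 65536 * d) = (a &&& c) + 65536 * (b &&& d) := by
  have h := pvAndSplit (t := 16) a b c d (by simpa using ha) (by simpa using hc)
  simpa using h

theorem pvOrLt8 {a b : Nat} (ha : a < 256) (hb : b < 256) : a ||| b < 256 := by
  have h := Nat.or_lt_two_pow (n := 8) (by simpa using ha) (by simpa using hb)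
  simpa using h

theorem pvMask8 {a : Nat} (ha : a < 256) : a &&& 255 = a := by
  have h := Nat.and_two_pow_sub_one_eq_mod a 8
  norm_num at h
  rw [h, Nat.mod_eq_of_lt ha]

-- ---- the per-bit spread value ----

def shN : Nat → Nat → Nat
  | 0, _ => 0
  | k+1, m => m % 2 + 4 * shN k (m / 2)

theorem pvShNBound : ∀ (k m : Nat), 3 * shN k m ≤ 4^k - 1 := by
  intro k
  induction k with
  | zero => intro m; simp [shN]
  | succ k ih =>
    intro m
    have h := ih (m / 2)
    have hp : 1 ≤ 4^k := Nat.one_le_pow _ _ (by norm_num)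
    have hm : m % 2 ≤ 1 := by omega
    simp only [shN, pow_succ]
    omega

theorem pvShNSplit : ∀ (j k m : Nat), shN (j + k) m = shN j m + 4^j * shN k (m / 2^j) := by
  intro j
  induction j with
  | zero => intro k m; simp [shN]
  | succ j ih =>
    intro k m
    have he : j + 1 + k = (j + k) + 1 := by omega
    rw [he]
    simp only [shN]
    rw [ih k (m / 2), Nat.div_div_eq_div_mul,
        show (2:Nat) * 2^j = 2^(j+1) from by rw [pow_succ]; ring, pow_succ]
    ring

theorem pvShNMod : ∀ (k m : Nat), shN k (m % 2^k) = shN k m := by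
  intro k
  induction k with
  | zero => intro m; rfl
  | succ k ih =>
    intro m
    have h2 : (m % 2^(k+1)) % 2 = m % 2 := Nat.mod_mod_of_dvd m (dvd_pow_self 2 (Nat.succ_ne_zero k))
    have hd : (m % 2^(k+1)) / 2 = (m / 2) % 2^k := by
      have hqr := Nat.div_add_mod m (2^(k+1))
      set q := m / 2^(k+1) with hq
      set r := m % 2^(k+1) with hr
      have hrlt : r < 2^(k+1) := Nat.mod_lt _ (by positivity)
      have hdiv : m / 2 = r / 2 + q * 2^k := by
        have hme : m = r + (q * 2^k) * 2 := by rw [← hqr, pow_succ]; ring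
        rw [hme, Nat.add_mul_div_right _ _ (by norm_num)]
      have hr2 : r / 2 < 2^k := by
        rw [Nat.div_lt_iff_lt_mul (by norm_num)]
        calc r < 2^(k+1) := hrlt
        _ = 2^k * 2 := by rw [pow_succ]
      rw [hdiv, Nat.add_mul_mod_self_right, Nat.mod_eq_of_lt hr2]
    simp only [shN]
    rw [h2, hd, ih (m / 2)]

theorem pvShNOdd : ∀ (k m i : Nat), (shN k m).testBit (2*i+1) = false := by
  intro k
  induction k with
  | zero => intro m i; simp [shN]
  | succ k ih =>
    intro m i
    simp only [shN]
    set s := shN k (m / 2) with hs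
    have hr : m % 2 ≤ 1 := by omega
    cases i with
    | zero =>
      have h1 : (m % 2 + 4 * s) / 2 = 2 * s := by omega
      have he : 2*0+1 = 0+1 := by omega
      rw [he, Nat.testBit_succ, h1, Nat.testBit_zero]
      simp [Nat.mul_mod_right]
    | succ i =>
      have h1 : (m % 2 + 4 * s) / 2 / 2 = s := by omega
      have he : 2*(i+1)+1 = ((2*i+1)+1)+1 := by omega
      rw [he, Nat.testBit_succ, Nat.testBit_succ, h1]
      exact ih (m / 2) i

theorem pvShNDisj (k a b : Nat) : shN k a &&& ((shN k b) <<< 1) = 0 := by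
  apply Nat.zero_of_testBit_eq_false
  intro i
  rw [Nat.testBit_and, Nat.testBit_shiftLeft]
  rcases Nat.even_or_odd i with he | ho
  · obtain ⟨j, hj⟩ := he
    by_cases h1 : 1 ≤ i
    · have hij : i - 1 = 2*(j-1)+1 := by omega
      rw [hij, pvShNOdd]
      simp
    · simp [show ¬(i ≥ 1) from h1]
  · obtain ⟨j, hj⟩ := ho
    rw [hj, pvShNOdd]
    simp

theorem pvChunkN (k a b : Nat) : shN k a ||| ((shN k b) <<< 1) = shN k a + 2 * shN k b := by
  rw [pvLorAdd _ _ (pvShNDisj k a b), Nat.shiftLeft_eq]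
  ring

-- ---- part1by1 on Nat, and its characterisation ----

def p1N (m : Nat) : Nat :=
  let n1 := m &&& 0xFFFF
  let n2 := (n1 ||| (n1 <<< 8)) &&& 0x00FF00FF
  let n3 := (n2 ||| (n2 <<< 4)) &&& 0x0F0F0F0F
  let n4 := (n3 ||| (n3 <<< 2)) &&& 0x33333333
  let n5 := (n4 ||| (n4 <<< 1)) &&& 0x55555555
  n5

def rA (x : Nat) : Nat := (x ||| x <<< 4) &&& 0x0F0F
def rB (x : Nat) : Nat := (x ||| x <<< 2) &&& 0x3333
def rC (x : Nat) : Nat := (x ||| x <<< 1) &&& 0x5555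
def qFn (x : Nat) : Nat := rC (rB (rA x))

theorem pvRoundSplit (s M a b : Nat) (ha' : a < 65536)
    (ha : a <<< s < 65536) (hM : M < 65536) :
    ((a + 65536*b) ||| ((a + 65536*b) <<< s)) &&& (M + 65536*M)
      = ((a ||| a <<< s) &&& M) + 65536 * ((b ||| b <<< s) &&& M) := by
  have h1 : (a + 65536*b) <<< s = (a <<< s) + 65536 * (b <<< s) := by
    simp only [Nat.shiftLeft_eq]; ring
  have hor : a ||| a <<< s < 65536 := by
    have h := Nat.or_lt_two_pow (n := 16) (x := a) (y := a <<< s) (by simpa using ha') (by simpa using ha)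
    simpa using h
  rw [h1, pvOrSplit16 a b (a <<< s) (b <<< s) ha' ha, pvAndSplit16 _ _ M M hor hM]

theorem pvRound1 (a b : Nat) (ha : a < 256) (hb : b < 256) :
    ((a + 256*b) ||| ((a + 256*b) <<< 8)) &&& 0x00FF00FF = a + 65536 * b := by
  have hm : (a + 256*b) <<< 8 = 0 + 256 * (a + 256*b) := by
    rw [Nat.shiftLeft_eq]; ring
  have h2 : (b + 256*0) ||| (a + 256*b) = (b ||| a) + 256*(0 ||| b) :=
    pvOrSplit8 b 0 a b hb ha
  simp only [Nat.mul_zero, Nat.add_zero, Nat.zero_or] at h2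
  rw [hm, pvOrSplit8 a b 0 (a + 256*b) ha (by norm_num), h2,
      show (0x00FF00FF : Nat) = 255 + 256 * (0 + 256*255) from by norm_num]
  rw [pvAndSplit8 (a ||| 0) ((b ||| a) + 256 * b) 255 (0 + 256*255)
        (by simpa using ha) (by norm_num)]
  rw [pvAndSplit8 (b ||| a) b 0 255 (pvOrLt8 hb ha) (by norm_num)]
  simp only [Nat.or_zero, Nat.zero_add, Nat.and_zero]
  rw [pvMask8 ha, pvMask8 hb]
  ring

theorem pvLane (a b : Nat) (ha : a < 256) (hb : b < 256) :
    p1N (a + 256 * b) = qFn a + 65536 * qFn b := by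
  have step0 : (a + 256 * b) &&& 0xFFFF = a + 256 * b := by
    rw [show (0xFFFF : Nat) = 2^16 - 1 from by norm_num, Nat.and_two_pow_sub_one_eq_mod,
        Nat.mod_eq_of_lt (by omega)]
  have hA : rA a ≤ 0x0F0F := Nat.and_le_right
  have hAb : rA b ≤ 0x0F0F := Nat.and_le_right
  have hB : rB (rA a) ≤ 0x3333 := Nat.and_le_right
  have hBb : rB (rA b) ≤ 0x3333 := Nat.and_le_right
  have s4 : (a ||| a <<< 4) &&& 0x0F0F = rA a := rfl
  have s4b : (b ||| b <<< 4) &&& 0x0F0F = rA b := rfl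
  have s2 : (rA a ||| rA a <<< 2) &&& 0x3333 = rB (rA a) := rfl
  have s2b : (rA b ||| rA b <<< 2) &&& 0x3333 = rB (rA b) := rfl
  have s1 : (rB (rA a) ||| rB (rA a) <<< 1) &&& 0x5555 = rC (rB (rA a)) := rfl
  have s1b : (rB (rA b) ||| rB (rA b) <<< 1) &&& 0x5555 = rC (rB (rA b)) := rfl
  have shl4 : ∀ x : Nat, x <<< 4 = x * 16 := fun x => by rw [Nat.shiftLeft_eq]
  have shl2 : ∀ x : Nat, x <<< 2 = x * 4 := fun x => by rw [Nat.shiftLeft_eq]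
  have shl1 : ∀ x : Nat, x <<< 1 = x * 2 := fun x => by rw [Nat.shiftLeft_eq]
  simp only [p1N]
  rw [step0, pvRound1 a b ha hb,
      show (0x0F0F0F0F : Nat) = 0x0F0F + 65536 * 0x0F0F from by norm_num,
      pvRoundSplit 4 0x0F0F a b (by omega) (by rw [shl4]; omega) (by norm_num),
      s4, s4b,
      show (0x33333333 : Nat) = 0x3333 + 65536 * 0x3333 from by norm_num,
      pvRoundSplit 2 0x3333 (rA a) (rA b) (by omega) (by rw [shl2]; omega) (by norm_num),
      s2, s2b,
      show (0x55555555 : Nat) = 0x5555 + 65536 * 0x5555 from by norm_num,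
      pvRoundSplit 1 0x5555 (rB (rA a)) (rB (rA b)) (by omega) (by rw [shl1]; omega) (by norm_num),
      s1, s1b]
  rfl

set_option maxRecDepth 10000 in
theorem pvQ : ∀ a : Nat, a < 256 → qFn a = shN 8 a := by decide

theorem pvP1N (m : Nat) (hm : m < 65536) : p1N m = shN 16 m := by
  have ha : m % 256 < 256 := Nat.mod_lt _ (by norm_num)
  have hb : m / 256 < 256 := by omega
  have hm' : m = m % 256 + 256 * (m / 256) := by omega
  rw [hm', pvLane _ _ ha hb, pvQ _ ha, pvQ _ hb]
  rw [show (16:Nat) = 8 + 8 from rfl, pvShNSplit 8 8]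
  rw [show ((m % 256 + 256 * (m / 256)) / 2^8) = m / 256 from by omega]
  rw [show shN 8 (m % 256 + 256 * (m / 256)) = shN 8 (m % 256) from by
        rw [← pvShNMod 8 (m % 256 + 256 * (m / 256))]; congr 1; omega]
  norm_num

-- ---- Int-side lemmas ----

theorem pvBandMask (x : Int) : PySem.Int.band x 0xFFFF = x % 65536 := by
  rcases x with m | n
  · have h := PySem.Int.band_natCast m 65535
    have he : (Int.ofNat m) = ((m : Nat) : Int) := rfl
    rw [he, show (0xFFFF : Int) = ((65535 : Nat) : Int) from by norm_num, h]
    rw [show m &&& 65535 = m % 65536 from by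
          have := Nat.and_two_pow_sub_one_eq_mod m 16; norm_num at this; exact this]
    omega
  · show PySem.Int.band (Int.negSucc n) 65535 = Int.negSucc n % 65536
    rw [PySem.Int.band]
    simp only [show ¬((0:Int) ≤ Int.negSucc n) from by omega, if_false,
               show ((0:Int) ≤ 65535) from by omega, if_true]
    rw [show (-(Int.negSucc n) - 1).toNat = n from by rw [Int.negSucc_eq]; omega]
    rw [show ((65535:Int).toNat) = 65535 from rfl]
    rw [show (65535 : Nat) &&& n = n % 65536 from by
          rw [Nat.and_comm]
          have := Nat.and_two_pow_sub_one_eq_mod n 16; norm_num at this; exact this]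
    rw [Int.negSucc_eq]
    omega

theorem pvBandOne (x : Int) : PySem.Int.band x 1 = x % 2 := by
  rcases x with m | n
  · have h := PySem.Int.band_natCast m 1
    have he : (Int.ofNat m) = ((m : Nat) : Int) := rfl
    rw [he, show (1 : Int) = ((1 : Nat) : Int) from rfl, h, Nat.and_one_is_mod]
    omega
  · show PySem.Int.band (Int.negSucc n) 1 = Int.negSucc n % 2
    rw [PySem.Int.band]
    simp only [show ¬((0:Int) ≤ Int.negSucc n) from by omega, if_false,
               show ((0:Int) ≤ 1) from by omega, if_true]
    rw [show (-(Int.negSucc n) - 1).toNat = n from by rw [Int.negSucc_eq]; omega]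
    rw [show ((1:Int).toNat) = 1 from rfl]
    rw [show (1 : Nat) &&& n = n % 2 from by rw [Nat.and_comm, Nat.and_one_is_mod]]
    rw [Int.negSucc_eq]
    omega

theorem pvCastShl (m : Nat) (s : Nat) : ((m : Nat) : Int) <<< s = ((m <<< s : Nat) : Int) := by
  rw [Int.shiftLeft_eq, Nat.shiftLeft_eq]
  push_cast
  ring

theorem pvEM1 (x : Int) (k : Nat) : (x / 2) % (2^k : Int) = (x % (2^(k+1) : Int)) / 2 := by
  have hqr : (2^(k+1) : Int) * (x / 2^(k+1)) + x % 2^(k+1) = x := Int.ediv_add_emod x (2^(k+1))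
  set q : Int := x / 2^(k+1) with hq
  set r : Int := x % 2^(k+1) with hr
  have hrpos : 0 ≤ r := Int.emod_nonneg x (by positivity)
  have hrlt : r < 2^(k+1) := Int.emod_lt_of_pos x (by positivity)
  have hx : x = r + (q * 2^k) * 2 := by rw [← hqr, pow_succ]; ring
  have hdiv : x / 2 = r / 2 + q * 2^k := by
    rw [hx, Int.add_mul_ediv_right _ _ (by norm_num)]
  have hr2lo : 0 ≤ r / 2 := Int.ediv_nonneg hrpos (by norm_num)
  have hr2hi : r / 2 < 2^k := by
    rw [Int.ediv_lt_iff_lt_mul (by norm_num)]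
    calc r < 2^(k+1) := hrlt
    _ = 2^k * 2 := by rw [pow_succ]
  rw [hdiv, show q * 2^k = 2^k * q from mul_comm _ _, Int.add_mul_emod_self_left,
      Int.emod_eq_of_lt hr2lo hr2hi]

theorem pvShr1 (x : Int) : x >>> (1:Nat) = x / 2 := by
  rw [Int.shiftRight_eq_div_pow]
  norm_num

-- ---- the interleaved value and both loops ----

def twI : Nat → Int → Int → Int
  | 0, _, _ => 0
  | k+1, x, y => PySem.Int.band x 1 + 2 * PySem.Int.band y 1 + 4 * twI k (x >>> (1:Nat)) (y >>> (1:Nat))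

theorem pvTwNat : ∀ (k : Nat) (x y : Int),
    twI k x y = ((shN k ((x % (2^k : Int)).toNat) + 2 * shN k ((y % (2^k : Int)).toNat) : Nat) : Int) := by
  intro k
  induction k with
  | zero => intro x y; simp [twI, shN]
  | succ k ih =>
    intro x y
    have hx := pvEM1 x k
    have hy := pvEM1 y k
    simp only [twI, pvBandOne, pvShr1, ih, shN]
    have hxpos : (0:Int) ≤ x % 2^(k+1) := Int.emod_nonneg x (by positivity)
    have hypos : (0:Int) ≤ y % 2^(k+1) := Int.emod_nonneg y (by positivity)
    have hx2 : x % 2 = ((x % (2^(k+1):Int)).toNat % 2 : Nat) := by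
      have := Int.emod_emod_of_dvd x (show (2:Int) ∣ 2^(k+1) from dvd_pow_self 2 (Nat.succ_ne_zero k))
      omega
    have hy2 : y % 2 = ((y % (2^(k+1):Int)).toNat % 2 : Nat) := by
      have := Int.emod_emod_of_dvd y (show (2:Int) ∣ 2^(k+1) from dvd_pow_self 2 (Nat.succ_ne_zero k))
      omega
    have hxd : ((x / 2) % (2^k : Int)).toNat = (x % (2^(k+1):Int)).toNat / 2 := by
      rw [hx]; omega
    have hyd : ((y / 2) % (2^k : Int)).toNat = (y % (2^(k+1):Int)).toNat / 2 := by
      rw [hy]; omega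
    rw [hxd, hyd, hx2, hy2]
    push_cast
    ring

theorem pvTwNonneg (k : Nat) (x y : Int) : 0 ≤ twI k x y := by
  rw [pvTwNat]; positivity

theorem pvTwLt (k : Nat) (x y : Int) : twI k x y < (4:Int)^k := by
  rw [pvTwNat]
  have h1 := pvShNBound k ((x % (2^k : Int)).toNat)
  have h2 := pvShNBound k ((y % (2^k : Int)).toNat)
  have hp : 1 ≤ (4:Nat)^k := Nat.one_le_pow _ _ (by norm_num)
  have : (shN k ((x % (2^k : Int)).toNat) + 2 * shN k ((y % (2^k : Int)).toNat) : Nat) < 4^k := by omega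
  calc ((shN k ((x % (2^k : Int)).toNat) + 2 * shN k ((y % (2^k : Int)).toNat) : Nat) : Int)
      < ((4^k : Nat) : Int) := by exact_mod_cast this
  _ = (4:Int)^k := by push_cast; ring

theorem pvShrShr (x : Int) (a b : Nat) : (x >>> a) >>> b = x >>> (a + b) := by
  rw [Int.shiftRight_eq_div_pow, Int.shiftRight_eq_div_pow, Int.shiftRight_eq_div_pow,
      Int.ediv_ediv_eq_ediv_mul (by positivity)]
  congr 1
  push_cast
  rw [pow_add]

theorem pvTwSplit : ∀ (a : Nat) (b : Nat) (x y : Int),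
    twI (a + b) x y = twI a x y + 4^a * twI b (x >>> a) (y >>> a) := by
  intro a
  induction a with
  | zero =>
    intro b x y
    simp only [Nat.zero_add, twI, pow_zero, one_mul]
    rw [show x >>> (0:Nat) = x from by rw [Int.shiftRight_eq_div_pow]; norm_num,
        show y >>> (0:Nat) = y from by rw [Int.shiftRight_eq_div_pow]; norm_num]
    ring
  | succ a ih =>
    intro b x y
    have he : a + 1 + b = (a + b) + 1 := by omega
    rw [he]
    simp only [twI]
    rw [ih b (x >>> (1:Nat)) (y >>> (1:Nat)), pvShrShr, pvShrShr,
        show 1 + a = a + 1 from by omega, pow_succ]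
    ring

theorem pvIntOrAdd (r c : Int) (k : Nat) (hr0 : 0 ≤ r) (hrk : r < (2:Int)^k) (hc : 0 ≤ c) :
    PySem.Int.bor r (c <<< k) = r + c * 2^k := by
  have hshift : c <<< k = c * 2^k := Int.shiftLeft_eq c k
  have hc2 : (0:Int) ≤ c * 2^k := by positivity
  rw [hshift, PySem.Int.bor_of_nonneg hr0 hc2]
  have hcast : ((2:Int)^k) = ((2^k : Nat) : Int) := by push_cast; ring
  have hrk' : r.toNat < 2^k := by rw [hcast] at hrk; omega
  rw [hcast]
  have h1 : c * ((2^k : Nat) : Int) = ((c.toNat * 2^k : Nat) : Int) := by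
    push_cast [Int.toNat_of_nonneg hc]; ring
  rw [h1, Int.toNat_natCast,
      show c.toNat * 2^k = c.toNat <<< k from (Nat.shiftLeft_eq _ _).symm,
      pvLorAdd _ _ (pvNatDisj r.toNat c.toNat hrk')]
  push_cast [Int.toNat_of_nonneg hr0, Int.toNat_of_nonneg hc, Nat.shiftLeft_eq]
  ring

set_option maxHeartbeats 1000000 in
theorem pvPart (x : Int) : part1by1 x = ((shN 16 ((x % 65536).toNat) : Nat) : Int) := by
  have hpos : (0:Int) ≤ x % 65536 := Int.emod_nonneg x (by norm_num)
  have hlt : x % 65536 < 65536 := Int.emod_lt_of_pos x (by norm_num)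
  set M := (x % 65536).toNat with hMdef
  have hM : x % 65536 = (M : Int) := (Int.toNat_of_nonneg hpos).symm
  have hMlt : M < 65536 := by omega
  simp only [part1by1]
  rw [pvBandMask x, hM, pvCastShl, PySem.Int.bor_natCast,
      show (0x00FF00FF : Int) = ((0x00FF00FF : Nat) : Int) from by norm_num,
      PySem.Int.band_natCast, pvCastShl, PySem.Int.bor_natCast,
      show (0x0F0F0F0F : Int) = ((0x0F0F0F0F : Nat) : Int) from by norm_num,
      PySem.Int.band_natCast, pvCastShl, PySem.Int.bor_natCast,
      show (0x33333333 : Int) = ((0x33333333 : Nat) : Int) from by norm_num,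
      PySem.Int.band_natCast, pvCastShl, PySem.Int.bor_natCast,
      show (0x55555555 : Int) = ((0x55555555 : Nat) : Int) from by norm_num,
      PySem.Int.band_natCast]
  rw [Nat.cast_inj]
  have hmask : M &&& 0xFFFF = M := by
    rw [show (0xFFFF : Nat) = 2^16 - 1 from by norm_num, Nat.and_two_pow_sub_one_eq_mod,
        Nat.mod_eq_of_lt hMlt]
  rw [← pvP1N M hMlt]
  simp only [p1N, hmask]

theorem pvChunk (x y : Int) :
    PySem.Int.bor (part1by1 (PySem.Int.band x 0xFFFF))
      ((part1by1 (PySem.Int.band y 0xFFFF)) <<< (1:Nat)) = twI 16 x y := by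
  have ex : PySem.Int.band x 0xFFFF % 65536 = x % 65536 := by
    rw [pvBandMask x]
    have hpos : (0:Int) ≤ x % 65536 := Int.emod_nonneg x (by norm_num)
    have hlt : x % 65536 < 65536 := Int.emod_lt_of_pos x (by norm_num)
    exact Int.emod_eq_of_lt hpos hlt
  have ey : PySem.Int.band y 0xFFFF % 65536 = y % 65536 := by
    rw [pvBandMask y]
    have hpos : (0:Int) ≤ y % 65536 := Int.emod_nonneg y (by norm_num)
    have hlt : y % 65536 < 65536 := Int.emod_lt_of_pos y (by norm_num)
    exact Int.emod_eq_of_lt hpos hlt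
  rw [pvPart, pvPart, ex, ey, pvCastShl, PySem.Int.bor_natCast, pvChunkN]
  rw [pvTwNat 16 x y, show ((2:Int)^16) = 65536 from by norm_num]

theorem pvLA (x y : Int) : ∀ (n : Nat),
    (List.range n).foldl
      (fun (s : Int × Int × Int) (i : Nat) =>
        (PySem.Int.bor s.1
          ((PySem.Int.bor (part1by1 (PySem.Int.band s.2.1 0xFFFF))
             ((part1by1 (PySem.Int.band s.2.2 0xFFFF)) <<< (1:Nat))) <<< (32 * i)),
         s.2.1 >>> (16:Nat), s.2.2 >>> (16:Nat)))
      (0, x, y)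
    = (twI (16*n) x y, x >>> (16*n), y >>> (16*n)) := by
  intro n
  induction n with
  | zero =>
    simp only [List.range_zero, List.foldl_nil, Nat.mul_zero]
    refine Prod.ext rfl (Prod.ext ?_ ?_) <;>
      simp [Int.shiftRight_eq_div_pow]
  | succ n ih =>
    rw [List.range_succ, List.foldl_append, ih, List.foldl_cons, List.foldl_nil]
    have h4 : (4:Int)^(16*n) = (2:Int)^(32*n) := by
      rw [show (4:Int) = 2^2 from by norm_num, ← pow_mul]
      congr 1
      omega
    have hkey : PySem.Int.bor (twI (16*n) x y)
        ((PySem.Int.bor (part1by1 (PySem.Int.band (x >>> (16*n)) 0xFFFF))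
           ((part1by1 (PySem.Int.band (y >>> (16*n)) 0xFFFF)) <<< (1:Nat))) <<< (32 * n))
        = twI (16*(n+1)) x y := by
      rw [pvChunk (x >>> (16*n)) (y >>> (16*n)),
          pvIntOrAdd _ _ _ (pvTwNonneg _ x y) (h4 ▸ pvTwLt (16*n) x y)
            (pvTwNonneg _ _ _),
          show 16*(n+1) = 16*n + 16 from by omega,
          pvTwSplit (16*n) 16 x y, h4]
      ring
    rw [show (16 * (n+1)) = 16*n + 16 from by omega, ← pvShrShr x (16*n) 16, ← pvShrShr y (16*n) 16]
    exact Prod.ext hkey (Prod.ext rfl rfl)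

theorem pvLB (x y : Int) : ∀ (n : Nat),
    (List.range n).foldl
      (fun (ret : Int) (j : Nat) =>
        PySem.Int.bor ret
          (PySem.Int.bor ((PySem.Int.band (x >>> j) 1) <<< (2 * j))
            ((PySem.Int.band (y >>> j) 1) <<< (2 * j + 1))))
      0
    = twI n x y := by
  intro n
  induction n with
  | zero => simp [twI]
  | succ n ih =>
    rw [List.range_succ, List.foldl_append, ih, List.foldl_cons, List.foldl_nil]
    have hbx0 : (0:Int) ≤ PySem.Int.band (x >>> (n:Nat)) 1 := by
      rw [pvBandOne]; exact Int.emod_nonneg _ (by norm_num)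
    have hbx1 : PySem.Int.band (x >>> (n:Nat)) 1 < 2 := by
      rw [pvBandOne]; exact Int.emod_lt_of_pos _ (by norm_num)
    have hby0 : (0:Int) ≤ PySem.Int.band (y >>> (n:Nat)) 1 := by
      rw [pvBandOne]; exact Int.emod_nonneg _ (by norm_num)
    set bx := PySem.Int.band (x >>> (n:Nat)) 1 with hbxd
    set by' := PySem.Int.band (y >>> (n:Nat)) 1 with hbyd
    have hinner : PySem.Int.bor (bx <<< (2*n)) (by' <<< (2*n+1))
        = (bx + 2 * by') <<< (2*n) := by
      rw [pvIntOrAdd (bx <<< (2*n)) by' (2*n+1)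
            (by rw [Int.shiftLeft_eq]; positivity)
            (by rw [Int.shiftLeft_eq, pow_succ]
                have h2 : (0:Int) < 2^(2*n) := by positivity
                nlinarith)
            hby0,
          Int.shiftLeft_eq, Int.shiftLeft_eq, pow_succ]
      ring
    have h4 : (4:Int)^n = (2:Int)^(2*n) := by
      rw [show (4:Int) = 2^2 from by norm_num, ← pow_mul]
    rw [hinner, pvIntOrAdd _ _ _ (pvTwNonneg n x y) (h4 ▸ pvTwLt n x y) (by positivity),
        show n + 1 = n + 1 from rfl, pvTwSplit n 1 x y, h4]
    simp only [twI]
    ring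

theorem pvMain (x y : Int) : interleave2 x y = interleave2_alt x y := by
  simp only [interleave2, interleave2_alt]
  rw [pvLA x y, pvLB x y]

-- ===== VERDICT (by name: the statement is the Claim_ definition above) =====
theorem interleave2_spec : Claim_equal_interleave2 := by
  intro x y _
  unfold Spec_interleave2
  exact pvMain x y
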